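-- pv_equiv track=rewrite | github.com/winoo19/wandavision | detect.py | closest_primary_colour
-- ===== SOURCE A (Python) =====
-- def closest_primary_colour(requested_colour):
--     """
--     Only primary colors
--     """
--     colors = {
--         "red": (255, 0, 0),
--         "green": (0, 255, 0),
--         "blue": (0, 0, 255),
--         "yellow": (255, 255, 0),
--         "cyan": (0, 255, 255),
--         "magenta": (255, 0, 255),
--         "white": (255, 255, 255),
--         "black": (0, 0, 0),
--     }
--
--     min_colours = {}
--     for key, value in colors.items():
--         r_c, g_c, b_c = value
--         rd = (r_c - requested_colour[0]) ** 2
--         gd = (g_c - requested_colour[1]) ** 2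
--         bd = (b_c - requested_colour[2]) ** 2
--         min_colours[(rd + gd + bd)] = key
--
--     return min_colours[min(min_colours.keys())]
-- ===== SOURCE B (Python) =====
-- def closest_primary_colour(requested_colour):
--     """
--     Only primary colors
--     """
--     colors = [
--         ("red", (255, 0, 0)),
--         ("green", (0, 255, 0)),
--         ("blue", (0, 0, 255)),
--         ("yellow", (255, 255, 0)),
--         ("cyan", (0, 255, 255)),
--         ("magenta", (255, 0, 255)),
--         ("white", (255, 255, 255)),
--         ("black", (0, 0, 0)),
--     ]
--
--     best_key = None
--     best_dist = None
--     for key, (r_c, g_c, b_c) in colors: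
--         d = (
--             (r_c - requested_colour[0]) ** 2
--             + (g_c - requested_colour[1]) ** 2
--             + (b_c - requested_colour[2]) ** 2
--         )
--         if best_dist is None or d <= best_dist:
--             best_key, best_dist = key, d
--     return best_key
-- ===== Notes on version B (the rewrite author's own statement) =====
-- stated objective: simpler
-- what changed: Replaced the distance-keyed dict plus min-over-keys scan with a single running-minimum pass (best_key/best_dist accumulator, ties updated with <= so the last color wins like the dict overwrite).
import Mathlib
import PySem

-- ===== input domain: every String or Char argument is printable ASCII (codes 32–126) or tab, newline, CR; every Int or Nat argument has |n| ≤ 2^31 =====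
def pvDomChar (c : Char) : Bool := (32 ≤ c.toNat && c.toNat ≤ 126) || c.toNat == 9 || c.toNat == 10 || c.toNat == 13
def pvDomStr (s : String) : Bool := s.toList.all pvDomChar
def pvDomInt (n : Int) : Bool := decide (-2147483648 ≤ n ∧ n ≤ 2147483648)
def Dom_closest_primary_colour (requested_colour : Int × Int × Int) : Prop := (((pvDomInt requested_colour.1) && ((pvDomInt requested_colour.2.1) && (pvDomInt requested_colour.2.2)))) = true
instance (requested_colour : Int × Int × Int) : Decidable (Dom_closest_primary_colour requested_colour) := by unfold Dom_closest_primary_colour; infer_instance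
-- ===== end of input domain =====

-- B replaces A's distance-keyed dict + min-over-keys scan by a single running-minimum
-- pass (objective: simpler); same return value, no side effects in either version.

-- the 8-color table both Pythons hard-code (insertion order of A's dict)
def pvColors : List (String × (Int × Int × Int)) :=
  [("red", (255, 0, 0)), ("green", (0, 255, 0)), ("blue", (0, 0, 255)),
   ("yellow", (255, 255, 0)), ("cyan", (0, 255, 255)), ("magenta", (255, 0, 255)),
   ("white", (255, 255, 255)), ("black", (0, 0, 0))]

-- ===== PORT A =====
-- loop body of A: rd/gd/bd squared deltas, then min_colours[(rd+gd+bd)] = key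
def pvAStep (requested_colour : Int × Int × Int) (d : PySem.Dict Int String)
    (kv : String × (Int × Int × Int)) : PySem.Dict Int String :=
  let rd := (kv.2.1 - requested_colour.1) ^ 2
  let gd := (kv.2.2.1 - requested_colour.2.1) ^ 2
  let bd := (kv.2.2.2 - requested_colour.2.2) ^ 2
  d.insert (rd + gd + bd) kv.1

def closest_primary_colour (requested_colour : Int × Int × Int) : String :=
  let min_colours := pvColors.foldl (pvAStep requested_colour) PySem.Dict.empty
  -- min(min_colours.keys()) then min_colours[...]; both total here (dict nonempty,
  -- the min key is a key), so the option fallbacks "" are unreachable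
  match PySem.List.min? min_colours.keys (fun x => x) with
  | some m => (min_colours.get? m).getD ""
  | none => ""

-- ===== PORT B =====
-- loop body of B: running (best_key, best_dist), update on d <= best_dist
def pvBStep (requested_colour : Int × Int × Int) (st : Option String × Option Int)
    (kv : String × (Int × Int × Int)) : Option String × Option Int :=
  let d := (kv.2.1 - requested_colour.1) ^ 2 + (kv.2.2.1 - requested_colour.2.1) ^ 2
           + (kv.2.2.2 - requested_colour.2.2) ^ 2
  match st.2 with
  | none => (some kv.1, some d)
  | some b => if d ≤ b then (some kv.1, some d) else st

def closest_primary_colour_alt (requested_colour : Int × Int × Int) : String :=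
  match (pvColors.foldl (pvBStep requested_colour) (none, none)).1 with
  | some k => k
  | none => ""   -- unreachable: the color list is nonempty

-- ===== PRECONDITION & SPEC =====
def Spec_closest_primary_colour (requested_colour : Int × Int × Int) (out : String) : Prop := out = closest_primary_colour_alt requested_colour
instance (requested_colour : Int × Int × Int) (out : String) : Decidable (Spec_closest_primary_colour requested_colour out) := by unfold Spec_closest_primary_colour; infer_instance

-- ===== CLAIM (what is proved, stated in full; the proofs are below) =====
def Claim_equal_closest_primary_colour : Prop := ∀ (requested_colour : Int × Int × Int), Dom_closest_primary_colour requested_colour → Spec_closest_primary_colour requested_colour (closest_primary_colour requested_colour)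

-- ===== LEMMAS AND PROOFS =====

-- Invariant carried through both loops at once: B's state is (some bk, some bd) where
-- bd is a least key of A's dict and A's dict stores bk at bd.
theorem pv_inv (rc : Int × Int × Int) :
    ∀ (l : List (String × (Int × Int × Int))) (d : PySem.Dict Int String) (bk : String) (bd : Int),
      bd ∈ d.keys → (∀ k ∈ d.keys, bd ≤ k) → d.get? bd = some bk →
      ∃ bk' bd',
        l.foldl (pvBStep rc) (some bk, some bd) = (some bk', some bd') ∧
        bd' ∈ (l.foldl (pvAStep rc) d).keys ∧
        (∀ k ∈ (l.foldl (pvAStep rc) d).keys, bd' ≤ k) ∧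
        (l.foldl (pvAStep rc) d).get? bd' = some bk' := by
  intro l
  induction l with
  | nil => intro d bk bd h1 h2 h3; exact ⟨bk, bd, rfl, h1, h2, h3⟩
  | cons kv t ih =>
    intro d bk bd h1 h2 h3
    simp only [List.foldl_cons]
    set dd := (kv.2.1 - rc.1) ^ 2 + (kv.2.2.1 - rc.2.1) ^ 2 + (kv.2.2.2 - rc.2.2) ^ 2 with hdd
    have hstep : pvBStep rc (some bk, some bd) kv =
        (if dd ≤ bd then (some kv.1, some dd) else (some bk, some bd)) := by
      simp [pvBStep, hdd]
    have hA : pvAStep rc d kv = d.insert dd kv.1 := by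
      simp [pvAStep, hdd]
    rw [hstep, hA]
    by_cases hle : dd ≤ bd
    · rw [if_pos hle]
      apply ih
      · exact (PySem.Dict.mem_keys_insert _ _ _ _).mpr (Or.inl rfl)
      · intro k hk
        rcases (PySem.Dict.mem_keys_insert _ _ _ _).mp hk with h | h
        · omega
        · exact le_trans hle (h2 k h)
      · exact PySem.Dict.get?_insert_self d dd kv.1
    · rw [if_neg hle]
      apply ih
      · exact (PySem.Dict.mem_keys_insert _ _ _ _).mpr (Or.inr h1)
      · intro k hk
        rcases (PySem.Dict.mem_keys_insert _ _ _ _).mp hk with h | h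
        · omega
        · exact h2 k h
      · rw [PySem.Dict.get?_insert_of_ne d kv.1 (by omega : bd ≠ dd)]
        exact h3


-- final read-out on A's side: with bd' a least key stored at value bk',
-- min(keys) is bd' and the lookup returns bk'
theorem pv_final (D : PySem.Dict Int String) (bk' : String) (bd' : Int)
    (hmem : bd' ∈ D.keys) (hmin : ∀ k ∈ D.keys, bd' ≤ k)
    (hget : D.get? bd' = some bk') :
    (match PySem.List.min? D.keys (fun x => x) with
     | some m => (D.get? m).getD ""
     | none => "") = bk' := by
  cases hmq : PySem.List.min? D.keys (fun x => x) with
  | none =>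
    rw [(PySem.List.min?_eq_none_iff D.keys _).mp hmq] at hmem
    simp at hmem
  | some m =>
    have hmeq : m = bd' :=
      le_antisymm (PySem.List.min?_isMin hmq bd' hmem) (hmin m (PySem.List.min?_mem hmq))
    simp [hmeq, hget]

-- ===== VERDICT (by name: the statement is the Claim_ definition above) =====
set_option maxHeartbeats 1000000 in
theorem closest_primary_colour_spec : Claim_equal_closest_primary_colour := by
  intro rc _
  unfold Spec_closest_primary_colour closest_primary_colour closest_primary_colour_alt pvColors
  simp only [List.foldl_cons]
  -- peel the first color ("red") to establish the invariant, then run pv_inv on the tail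
  set dd := ((255 : Int) - rc.1) ^ 2 + ((0 : Int) - rc.2.1) ^ 2 + ((0 : Int) - rc.2.2) ^ 2 with hdd
  have hA0 : pvAStep rc PySem.Dict.empty ("red", (255, 0, 0)) =
      PySem.Dict.empty.insert dd "red" := by
    simp [pvAStep, hdd]
  have hB0 : pvBStep rc (none, none) ("red", (255, 0, 0)) = (some "red", some dd) := by
    simp [pvBStep, hdd]
  rw [hA0, hB0]
  obtain ⟨bk', bd', hBfold, hmem, hmin, hget⟩ :=
    pv_inv rc
      [("green", (0, 255, 0)), ("blue", (0, 0, 255)), ("yellow", (255, 255, 0)),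
       ("cyan", (0, 255, 255)), ("magenta", (255, 0, 255)), ("white", (255, 255, 255)),
       ("black", (0, 0, 0))]
      (PySem.Dict.empty.insert dd "red") "red" dd
      (by simp [PySem.Dict.mem_keys_insert])
      (by intro k hk
          rcases (PySem.Dict.mem_keys_insert _ _ _ _).mp hk with h | h
          · omega
          · simp [PySem.Dict.keys_empty] at h)
      (PySem.Dict.get?_insert_self _ dd "red")
  simp only [List.foldl_cons, List.foldl_nil] at hBfold hmem hmin hget
  rw [hBfold]
  exact pv_final _ bk' bd' hmem hmin hget
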